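-- pv_equiv track=rewrite | github.com/JolenePek/MyPA | app.py | binary_to_hour_v2
-- ===== SOURCE A (Python) =====
-- def binary_to_hour_v2(day):
--     hour_by_hour = [(1,'8'), (5,'9'), (9,'10'), (13,'11'), (17,'12'), (21,'13'), (25,'14'),
--              (29,'15'), (33,'16'), (37,'17'), (41,'18'), (45,'19'), (49,'20'), (53,'21')]
--
--     prev_time = '800'
--     prev_place = 1
--     result = []
--     for segment in range(len(day)): #segment == (16, '0')
--
--         if day[segment][0] == 56:
--             output = ('800-2200', day[segment][1])
--             result.append(output)
--             continue
--
--
--         x = day[segment][0] + prev_place #x = 17,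
--         for i in range(len(hour_by_hour)):
--
--             #For cases where timing falls in last block
--             if x >52:
--                 if x == 53:
--                     time = '2100'
--                 elif x == 54:
--                     time = '2115'
--                 elif x == 55:
--                     time = '2130'
--                 elif x == 56:
--                     time = '2145'
--                 elif x == 57:
--                     time = '2200'
--
--             #For all other cases
--             elif (x >= hour_by_hour[i][0]) and (x < hour_by_hour[i+1][0]):
--
--                 #settle the hour
--                 time = hour_by_hour[i][1]
--
--                 #settle the minute
--                 if x == hour_by_hour[i][0]:
--                     time += '00'
--                 elif x-1 == hour_by_hour[i][0]:
--                     time += '15'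
--                 elif x-2 == hour_by_hour[i][0]:
--                     time += '30'
--                 else:
--                     time += '45'
--
--         output = ((prev_time + '-' + time), day[segment][1])
--         prev_time = time
--         prev_place = x
--
--         result.append(output)
--
--     return dict(result)
-- ===== SOURCE B (Python) =====
-- def binary_to_hour_v2(day):
--     # Stage 1: prefix-sum the non-56 segments into their cumulative boundary slots.
--     slots = []
--     p = 1
--     for v, _ in day:
--         if v != 56:
--             p += v
--             slots.append(p)
--     # Stage 2: slot -> quarter-hour clock string, '800'..'2200' for slots 1..57.
--     marks = {q + 1: str(100 * (8 + q // 4) + 15 * (q % 4)) for q in range(57)}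
--     times = [marks[s] for s in slots]  # KeyError when a slot leaves 1..57
--     # Stage 3: pair consecutive boundaries into ranges, re-interleave all-day (56) segments.
--     ranges = [a + '-' + b for a, b in zip(['800'] + times, times)]
--     it = iter(ranges)
--     return dict(('800-2200', lbl) if v == 56 else (next(it), lbl) for v, lbl in day)
-- ===== Notes on version B (the rewrite author's own statement) =====
-- stated objective: alternative
-- what changed: Replaces A's single pass with prev_time/prev_place accumulators and a per-segment 14-entry table scan by a staged pipeline: prefix-sum the non-56 segments into boundary slots, map each slot through a quarter-hour mark table, zip consecutive boundaries pairwise into range strings, then re-interleave the all-day (56) segments in a final pass.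
-- outside the precondition, e.g. on binary_to_hour_v2([(3, 'a'), (60, 'b')]): A returns {'800-845': 'a', '845-845': 'b'}, B raises KeyError; on binary_to_hour_v2([(100, 'a')]): A raises UnboundLocalError, B raises KeyError
import Mathlib
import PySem

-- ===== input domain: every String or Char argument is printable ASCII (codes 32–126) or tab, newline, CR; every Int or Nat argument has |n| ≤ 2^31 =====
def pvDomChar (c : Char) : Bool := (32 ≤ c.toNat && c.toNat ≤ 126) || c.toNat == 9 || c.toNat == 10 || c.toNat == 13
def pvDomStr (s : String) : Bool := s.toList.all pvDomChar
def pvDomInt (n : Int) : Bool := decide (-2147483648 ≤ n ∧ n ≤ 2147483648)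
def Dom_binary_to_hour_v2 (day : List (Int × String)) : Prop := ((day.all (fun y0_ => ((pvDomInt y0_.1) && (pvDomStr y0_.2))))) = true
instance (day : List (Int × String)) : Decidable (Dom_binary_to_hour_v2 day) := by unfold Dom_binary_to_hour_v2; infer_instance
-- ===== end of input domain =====

-- B replaces A's single-pass accumulator with per-segment table scan by a staged pipeline:
-- prefix-sum the slots, map them to clock strings, zip pairwise into ranges, re-interleave
-- (objective: alternative, same cost).
-- ===== PORT A =====
-- the hour_by_hour table of A
def pvHbh : List (Int × String) :=
  [(1,"8"), (5,"9"), (9,"10"), (13,"11"), (17,"12"), (21,"13"), (25,"14"),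
   (29,"15"), (33,"16"), (37,"17"), (41,"18"), (45,"19"), (49,"20"), (53,"21")]

-- one iteration of A's inner 'for i in range(len(hour_by_hour))' loop; t is the current value of
-- the Python variable 'time' (none = unbound).  Python's 'and' short-circuits, so hour_by_hour[i+1]
-- is only read when x >= hour_by_hour[i][0] holds; for i = 13 that conjunct is false whenever the
-- elif is reached (x <= 52), so the pyGetD default on the i+1 lookup is never used (no IndexError).
def pvInnerStep (x : Int) (t : Option String) (i : Nat) : Option String :=
  if x > 52 then
    if x = 53 then some "2100"
    else if x = 54 then some "2115"
    else if x = 55 then some "2130"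
    else if x = 56 then some "2145"
    else if x = 57 then some "2200"
    else t
  else if x ≥ (PySem.List.pyGetD pvHbh (i : Int) (0,"")).1 ∧
          x < (PySem.List.pyGetD pvHbh ((i : Int) + 1) (0,"")).1 then
    let h := (PySem.List.pyGetD pvHbh (i : Int) (0,"")).2
    if x = (PySem.List.pyGetD pvHbh (i : Int) (0,"")).1 then some (h ++ "00")
    else if x - 1 = (PySem.List.pyGetD pvHbh (i : Int) (0,"")).1 then some (h ++ "15")
    else if x - 2 = (PySem.List.pyGetD pvHbh (i : Int) (0,"")).1 then some (h ++ "30")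
    else some (h ++ "45")
  else t

-- one iteration of A's outer loop; state = (prev_time, prev_place, time-variable, result).
-- '.getD ""' reads the Python variable 'time': none there is Python's UnboundLocalError
-- (excluded by Pre_); the variable persists across outer iterations exactly as in Python.
def pvStepA (st : String × Int × Option String × List (String × String)) (seg : Int × String) :
    String × Int × Option String × List (String × String) :=
  let (prev_time, prev_place, t, result) := st
  if seg.1 = 56 then (prev_time, prev_place, t, result ++ [("800-2200", seg.2)])
  else
    let x := seg.1 + prev_place
    let t' := (List.range pvHbh.length).foldl (pvInnerStep x) t
    let time := t'.getD ""
    (time, x, t', result ++ [(prev_time ++ "-" ++ time, seg.2)])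

def binary_to_hour_v2 (day : List (Int × String)) : List (String × String) :=
  let st := day.foldl pvStepA ("800", 1, none, [])
  (PySem.Dict.ofList st.2.2.2).items

-- ===== PORT B =====
-- B's dict comprehension {q+1: str(100*(8+q//4)+15*(q%4)) for q in range(57)}
def pvMarks : PySem.Dict Int String :=
  (PySem.List.pyRange 0 57 1).foldl
    (fun d q =>
      d.insert (q + 1)
        (PySem.Int.toStr (100 * (8 + PySem.Int.floordiv q 4) + 15 * PySem.Int.mod q 4)))
    PySem.Dict.empty

-- B, staged: stage 1 prefix-sums the non-56 segments (state = (p, slots)); stage 2 maps each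
-- slot through marks ('.getD ""' is the dict lookup: none is Python's KeyError, excluded by
-- Pre_); stage 3 zips consecutive boundaries into range strings and the final pass re-interleaves
-- the 56 segments, consuming the ranges iterator (state = (remaining ranges, out)); next(it)
-- never exhausts within Pre_ ('.headD ""' reads it).
def binary_to_hour_v2_alt (day : List (Int × String)) : List (String × String) :=
  let slots := (day.foldl
      (fun (st : Int × List Int) seg =>
        if seg.1 ≠ 56 then (st.1 + seg.1, st.2 ++ [st.1 + seg.1]) else st)
      (1, ([] : List Int))).2
  let times := slots.map (fun s => (pvMarks.get? s).getD "")
  let ranges := (List.zip ("800" :: times) times).map (fun ab => ab.1 ++ "-" ++ ab.2)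
  let st := day.foldl
      (fun (st : List String × List (String × String)) seg =>
        if seg.1 = 56 then (st.1, st.2 ++ [("800-2200", seg.2)])
        else (st.1.tail, st.2 ++ [(st.1.headD "", seg.2)]))
      (ranges, ([] : List (String × String)))
  (PySem.Dict.ofList st.2).items

-- ===== PRECONDITION & SPEC =====
-- Pre_ excludes inputs whose cumulative slot 1 + (running sum of the non-56 first components)
-- ever leaves 1..57: there A's table scan binds no 'time' (UnboundLocalError on the first such
-- segment) or silently reuses the previous segment's stale time, while B's marks lookup raises
-- KeyError.
def Pre_binary_to_hour_v2 (day : List (Int × String)) : Prop :=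
  ∀ k, k < (((day.map Prod.fst).filter (fun v => v ≠ 56)).length) →
    1 ≤ 1 + ((((day.map Prod.fst).filter (fun v => v ≠ 56)).take (k+1)).sum) ∧
    1 + ((((day.map Prod.fst).filter (fun v => v ≠ 56)).take (k+1)).sum) ≤ 57

instance (day : List (Int × String)) : Decidable (Pre_binary_to_hour_v2 day) := by
  unfold Pre_binary_to_hour_v2; infer_instance

def pvWitness_binary_to_hour_v2 : (List (Int × String)) := [(16, "0"), (4, "1"), (56, "z")]

def Spec_binary_to_hour_v2 (day : List (Int × String)) (out : List (String × String)) : Prop := out = binary_to_hour_v2_alt day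
instance (day : List (Int × String)) (out : List (String × String)) : Decidable (Spec_binary_to_hour_v2 day out) := by unfold Spec_binary_to_hour_v2; infer_instance

-- ===== CLAIM (what is proved, stated in full; the proofs are below) =====
def Claim_equal_binary_to_hour_v2 : Prop := ∀ (day : List (Int × String)), Dom_binary_to_hour_v2 day → Pre_binary_to_hour_v2 day → Spec_binary_to_hour_v2 day (binary_to_hour_v2 day)

-- ===== LEMMAS AND PROOFS =====

-- reference recursion both programs are reduced to: prev_time pt, prev_place pp
def pvComb (pt : String) (pp : Int) : List (Int × String) → List (String × String)
  | [] => []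
  | seg :: rest =>
    if seg.1 = 56 then ("800-2200", seg.2) :: pvComb pt pp rest
    else
      let t := (pvMarks.get? (pp + seg.1)).getD ""
      (pt ++ "-" ++ t, seg.2) :: pvComb t (pp + seg.1) rest

-- For an in-range slot x, A's inner scan returns exactly B's marks entry (some s),
-- for ANY incoming value of the 'time' variable.
set_option maxRecDepth 8192 in
lemma pvInner_eq_table (x : Int) (h1 : 1 ≤ x) (h2 : x ≤ 57) (t : Option String) :
    (List.range pvHbh.length).foldl (pvInnerStep x) t = pvMarks.get? x := by
  interval_cases x <;> rfl

-- running-sum precondition in a shape the induction can consume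
def pvOk (p : Int) (vs : List Int) : Prop :=
  ∀ k, k < vs.length → 1 ≤ p + ((vs.take (k+1)).sum) ∧ p + ((vs.take (k+1)).sum) ≤ 57

lemma pvOk_cons {p v : Int} {vs : List Int} (h : pvOk p (v :: vs)) :
    (1 ≤ p + v ∧ p + v ≤ 57) ∧ pvOk (p + v) vs := by
  constructor
  · have := h 0 (by simp)
    simpa using this
  · intro k hk
    have := h (k + 1) (by simpa using Nat.succ_lt_succ hk)
    simpa [List.sum_cons, add_assoc] using this

-- A's fold equals the reference recursion under the running-sum condition
lemma pvA_eq_comb (day : List (Int × String)) :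
    ∀ (pt : String) (pp : Int) (t : Option String) (res : List (String × String)),
      pvOk pp ((day.map Prod.fst).filter (fun v => v ≠ 56)) →
      (day.foldl pvStepA (pt, pp, t, res)).2.2.2 = res ++ pvComb pt pp day := by
  induction day with
  | nil => intro pt pp t res _; simp [pvComb]
  | cons seg rest ih =>
    intro pt pp t res hok
    rw [List.foldl_cons]
    by_cases h56 : seg.1 = 56
    · simp only [pvStepA]
      rw [if_pos h56, ih _ _ _ _ (by simpa [h56] using hok)]
      simp [pvComb, h56]
    · have hok' : pvOk pp (seg.1 :: ((rest.map Prod.fst).filter (fun v => v ≠ 56))) := by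
        simpa [h56] using hok
      obtain ⟨⟨hx1, hx2⟩, hrest⟩ := pvOk_cons hok'
      have hinner := pvInner_eq_table (seg.1 + pp) (by omega) (by omega) t
      rw [show pp + seg.1 = seg.1 + pp from by ring] at hrest
      simp only [pvStepA]
      rw [if_neg h56, hinner, ih _ _ _ _ hrest]
      simp [pvComb, h56, Int.add_comm]

-- stage 1 (prefix sums) in recursive form
def pvSlotsRec (p : Int) : List (Int × String) → List Int
  | [] => []
  | seg :: rest =>
    if seg.1 ≠ 56 then (p + seg.1) :: pvSlotsRec (p + seg.1) rest else pvSlotsRec p rest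

lemma pvSlots_fold (day : List (Int × String)) (p : Int) (acc : List Int) :
      (day.foldl
        (fun (st : Int × List Int) seg =>
          if seg.1 ≠ 56 then (st.1 + seg.1, st.2 ++ [st.1 + seg.1]) else st)
        (p, acc)).2 = acc ++ pvSlotsRec p day := by
  induction day generalizing p acc with
  | nil => simp [pvSlotsRec]
  | cons seg rest ih =>
    rw [List.foldl_cons]
    by_cases h56 : seg.1 = 56
    · rw [if_neg (not_not_intro h56), ih]
      simp [pvSlotsRec, h56]
    · rw [if_pos h56, ih]
      simp [pvSlotsRec, h56]

-- stage-3 merge in recursive form, consuming the ranges list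
def pvMergeRec (rs : List String) : List (Int × String) → List (String × String)
  | [] => []
  | seg :: rest =>
    if seg.1 = 56 then ("800-2200", seg.2) :: pvMergeRec rs rest
    else (rs.headD "", seg.2) :: pvMergeRec rs.tail rest

lemma pvMerge_fold (day : List (Int × String)) (rs : List String)
    (out : List (String × String)) :
      (day.foldl
        (fun (st : List String × List (String × String)) seg =>
          if seg.1 = 56 then (st.1, st.2 ++ [("800-2200", seg.2)])
          else (st.1.tail, st.2 ++ [(st.1.headD "", seg.2)]))
        (rs, out)).2 = out ++ pvMergeRec rs day := by
  induction day generalizing rs out with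
  | nil => simp [pvMergeRec]
  | cons seg rest ih =>
    rw [List.foldl_cons]
    by_cases h56 : seg.1 = 56
    · rw [if_pos h56, ih]
      simp [pvMergeRec, h56]
    · rw [if_neg h56, ih]
      simp [pvMergeRec, h56]

def pvRangesOf (pt : String) (ts : List String) : List String :=
  (List.zip (pt :: ts) ts).map (fun ab => ab.1 ++ "-" ++ ab.2)

lemma pvRangesOf_eq (pt : String) (ts : List String) :
    (List.zip (pt :: ts) ts).map (fun ab => ab.1 ++ "-" ++ ab.2) = pvRangesOf pt ts := rfl

-- the staged pipeline equals the reference recursion (unconditionally)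
lemma pvStaged_eq_comb (day : List (Int × String)) :
    ∀ (pt : String) (pp : Int),
      pvMergeRec (pvRangesOf pt ((pvSlotsRec pp day).map (fun s => (pvMarks.get? s).getD ""))) day
        = pvComb pt pp day := by
  induction day with
  | nil => intro pt pp; simp [pvMergeRec, pvComb]
  | cons seg rest ih =>
    intro pt pp
    by_cases h56 : seg.1 = 56
    · have hslots : pvSlotsRec pp (seg :: rest) = pvSlotsRec pp rest := by
        simp [pvSlotsRec, h56]
      rw [hslots]
      simp only [pvMergeRec, pvComb]
      rw [if_pos h56, if_pos h56, ih]
    · have hslots : pvSlotsRec pp (seg :: rest) = (pp + seg.1) :: pvSlotsRec (pp + seg.1) rest := by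
        simp [pvSlotsRec, h56]
      rw [hslots, List.map_cons,
        show ∀ (a : String) (ts : List String),
            pvRangesOf pt (a :: ts) = (pt ++ "-" ++ a) :: pvRangesOf a ts from fun a ts => rfl]
      simp only [pvMergeRec, pvComb]
      rw [if_neg h56, if_neg h56, List.headD_cons, List.tail_cons, ih]

-- ===== VERDICT (by name: the statement is the Claim_ definition above) =====
theorem binary_to_hour_v2_spec : Claim_equal_binary_to_hour_v2 := by
  intro day _ hpre
  unfold Spec_binary_to_hour_v2 binary_to_hour_v2 binary_to_hour_v2_alt
  have hA := pvA_eq_comb day "800" 1 none [] (by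
    intro k hk
    have := hpre k hk
    omega)
  simp only [pvSlots_fold, List.nil_append, pvRangesOf_eq, pvMerge_fold, pvStaged_eq_comb, hA]
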